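-- pv_equiv track=rewrite | github.com/dhlee47/balanced_study | src/algorithms.py | _serpentine_pattern
-- ===== SOURCE A (Python) =====
-- def _serpentine_pattern(sizes: list[int]) -> list[int]:
--     """
--     Build a snake/serpentine assignment pattern that respects unequal group sizes.
--
--     Animals are dealt in alternating forward/backward sweeps so that every
--     group receives animals from across the full score distribution even when
--     sizes differ (e.g. [5, 4, 3] for k=3, n=12).
--     """
--     remaining = list(sizes)
--     pattern: list[int] = []
--     k = len(sizes)
--     active = list(range(k))  # groups that still need animals
--
--     while active:
--         for g in list(active):  # forward sweep
--             if remaining[g] > 0: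
--                 pattern.append(g)
--                 remaining[g] -= 1
--             if remaining[g] == 0:
--                 active.remove(g)
--
--         for g in list(reversed(active)):  # backward sweep
--             if remaining[g] > 0:
--                 pattern.append(g)
--                 remaining[g] -= 1
--             if remaining[g] == 0:
--                 active.remove(g)
--
--     return pattern
-- ===== SOURCE B (Python) =====
-- def _serpentine_pattern(sizes: list[int]) -> list[int]:
--     """Level-by-level serpentine: at level t emit every group still needing
--     animals (sizes[g] > t), ascending on even levels, descending on odd."""
--     pattern: list[int] = []
--     for t in range(max(sizes, default=0)):
--         level = [g for g in range(len(sizes)) if sizes[g] > t]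
--         if t % 2:
--             level.reverse()
--         pattern.extend(level)
--     return pattern
-- ===== Notes on version B (the rewrite author's own statement) =====
-- stated objective: simpler
-- what changed: Replaces the mutable remaining-counter/active-list simulation with a direct level-by-level construction: for each level t emit the groups with sizes[g] > t, ascending on even t and descending on odd t.
import Mathlib
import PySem

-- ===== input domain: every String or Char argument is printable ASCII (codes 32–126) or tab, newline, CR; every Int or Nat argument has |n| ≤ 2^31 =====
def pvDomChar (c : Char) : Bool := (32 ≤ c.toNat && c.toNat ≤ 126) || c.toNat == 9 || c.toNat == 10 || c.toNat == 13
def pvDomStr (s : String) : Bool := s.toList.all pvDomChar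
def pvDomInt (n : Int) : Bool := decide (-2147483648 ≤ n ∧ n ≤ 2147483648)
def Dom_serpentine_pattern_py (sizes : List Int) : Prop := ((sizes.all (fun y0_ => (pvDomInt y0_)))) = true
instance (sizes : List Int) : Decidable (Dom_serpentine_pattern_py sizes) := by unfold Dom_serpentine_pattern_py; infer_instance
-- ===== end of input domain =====

-- B replaces A's mutable remaining-counter/active-list simulation by emitting the pattern
-- level by level (groups with sizes[g] > t, ascending on even t, descending on odd t); equal on all
-- non-negative size lists (A never terminates on a negative size, which Pre_ excludes).

-- ===== PORT A =====
-- one body of the inner 'for g in …' loops: state is (remaining, active, pattern)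
def sweepStep (st : List Int × List Nat × List Int) (g : Nat) : List Int × List Nat × List Int :=
  let r := st.1.getD g 0
  let rem := if 0 < r then st.1.set g (r - 1) else st.1
  let pat := if 0 < r then st.2.2 ++ [(g : Int)] else st.2.2
  let act := if rem.getD g 0 = 0 then st.2.1.erase g else st.2.1
  (rem, act, pat)

def runSweep (snap : List Nat) (st : List Int × List Nat × List Int) :
    List Int × List Nat × List Int :=
  snap.foldl sweepStep st

-- the 'while active:' loop; fuel only totalizes it (Python diverges on negative sizes,
-- excluded by Pre_; on Pre_ the fuel given below is always sufficient)
def whileLoop : Nat → List Int → List Nat → List Int → List Int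
  | 0, _, _, pat => pat
  | fuel + 1, rem, act, pat =>
    if act.isEmpty then pat
    else
      let s1 := runSweep act (rem, act, pat)          -- forward sweep over list(active)
      let s2 := runSweep s1.2.1.reverse s1            -- backward sweep over list(reversed(active))
      whileLoop fuel s2.1 s2.2.1 s2.2.2

def serpentine_pattern_py (sizes : List Int) : List Int :=
  whileLoop (sizes.foldl (fun a s => a + s.toNat) 0 + 1) sizes (List.range sizes.length) []

-- ===== PORT B =====
-- [g for g in range(len(sizes)) if sizes[g] > t]
def levelOf (sizes : List Int) (t : Nat) : List Nat :=
  (List.range sizes.length).filter (fun g => decide ((t : Int) < sizes.getD g 0))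

def serpentine_pattern_py_alt (sizes : List Int) : List Int :=
  (List.range (sizes.max?.getD 0).toNat).foldl
    (fun pat t =>
      let lv := levelOf sizes t
      let lv := if t % 2 = 1 then lv.reverse else lv
      pat ++ lv.map (fun g => (g : Int))) []

-- ===== PRECONDITION & SPEC =====
-- Pre_ excludes lists containing a negative size: A's while loop never terminates there
-- (the counter never reaches 0), so A returns on exactly the inputs Pre_ admits.
def Pre_serpentine_pattern_py (sizes : List Int) : Prop := ∀ s ∈ sizes, 0 ≤ s
instance (sizes : List Int) : Decidable (Pre_serpentine_pattern_py sizes) := by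
  unfold Pre_serpentine_pattern_py; infer_instance

def pvWitness_serpentine_pattern_py : List Int := [5, 4, 3]

def Spec_serpentine_pattern_py (sizes : List Int) (out : List Int) : Prop := out = serpentine_pattern_py_alt sizes
instance (sizes : List Int) (out : List Int) : Decidable (Spec_serpentine_pattern_py sizes out) := by unfold Spec_serpentine_pattern_py; infer_instance

-- ===== CLAIM (what is proved, stated in full; the proofs are below) =====
def Claim_equal_serpentine_pattern_py : Prop := ∀ (sizes : List Int), Dom_serpentine_pattern_py sizes → Pre_serpentine_pattern_py sizes → Spec_serpentine_pattern_py sizes (serpentine_pattern_py sizes)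

-- ===== LEMMAS AND PROOFS =====

-- remaining after t levels have been dealt (valid on non-negative sizes)
def mrem (sizes : List Int) (t : Nat) : List Int :=
  sizes.map (fun s => max (s - (t : Int)) 0)

-- what one level contributes to the pattern
def dirLevel (sizes : List Int) (t : Nat) : List Int :=
  ((if t % 2 = 1 then (levelOf sizes t).reverse else levelOf sizes t).map (fun g => (g : Int)))

lemma length_mrem (sizes : List Int) (t : Nat) : (mrem sizes t).length = sizes.length := by
  simp [mrem]

lemma getD_mrem (sizes : List Int) (t : Nat) (j : Nat) (hj : j < sizes.length) :
    (mrem sizes t).getD j 0 = max (sizes.getD j 0 - (t : Int)) 0 := by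
  simp [mrem, List.getD_eq_getElem?_getD, List.getElem?_map, List.getElem?_eq_getElem hj]

lemma mem_levelOf (sizes : List Int) (t : Nat) (g : Nat) :
    g ∈ levelOf sizes t ↔ g < sizes.length ∧ (t : Int) < sizes.getD g 0 := by
  simp [levelOf]

lemma nodup_levelOf (sizes : List Int) (t : Nat) : (levelOf sizes t).Nodup :=
  (List.nodup_range).filter _

-- generic description of one sweep, everything in terms of the ORIGINAL remaining list
lemma runSweep_eq (snap : List Nat) :
    ∀ (rem : List Int) (act : List Nat) (p : List Int),
    snap.Nodup → (∀ g ∈ snap, g < rem.length) →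
    runSweep snap (rem, act, p) =
      (snap.foldl (fun r g => if 0 < rem.getD g 0 then r.set g (rem.getD g 0 - 1) else r) rem,
       snap.foldl (fun a g =>
          if (if 0 < rem.getD g 0 then rem.getD g 0 - 1 else rem.getD g 0) = 0
          then a.erase g else a) act,
       p ++ (snap.filter (fun g => decide (0 < rem.getD g 0))).map (fun g => (g : Int))) := by
  induction snap with
  | nil => intro rem act p _ _; simp [runSweep]
  | cons g tl ih =>
    intro rem act p hnd hlt
    simp only [List.nodup_cons] at hnd
    have hg : g < rem.length := hlt g (by simp)
    have hset : (rem.set g (rem.getD g 0 - 1)).getD g 0 = rem.getD g 0 - 1 := by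
      rw [List.getD_eq_getElem?_getD, List.getElem?_set_self hg]; rfl
    have hstep : sweepStep (rem, act, p) g =
        (if 0 < rem.getD g 0 then rem.set g (rem.getD g 0 - 1) else rem,
         if (if 0 < rem.getD g 0 then rem.getD g 0 - 1 else rem.getD g 0) = 0 then act.erase g else act,
         if 0 < rem.getD g 0 then p ++ [(g : Int)] else p) := by
      by_cases h : 0 < rem.getD g 0
      · simp only [sweepStep, if_pos h, hset]
      · simp only [sweepStep, if_neg h]
    have hgd : ∀ x ∈ tl, (if 0 < rem.getD g 0 then rem.set g (rem.getD g 0 - 1) else rem).getD x 0 = rem.getD x 0 := by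
      intro x hx
      have : x ≠ g := fun h => hnd.1 (h ▸ hx)
      split
      · rw [List.getD_eq_getElem?_getD, List.getElem?_set_ne (by omega), ← List.getD_eq_getElem?_getD]
      · rfl
    have hlen : ∀ x ∈ tl, x < (if 0 < rem.getD g 0 then rem.set g (rem.getD g 0 - 1) else rem).length := by
      intro x hx
      have := hlt x (List.mem_cons_of_mem _ hx)
      split <;> simpa
    show runSweep tl (sweepStep (rem, act, p) g) = _
    rw [hstep, ih _ _ _ hnd.2 hlen]
    refine congrArg₂ Prod.mk ?_ (congrArg₂ Prod.mk ?_ ?_)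
    · rw [List.foldl_cons]
      refine PySem.List.foldl_congr_mem _ _ _ _ ?_
      intro acc x hx
      rw [hgd x hx]
    · rw [List.foldl_cons]
      refine PySem.List.foldl_congr_mem _ _ _ _ ?_
      intro acc x hx
      rw [hgd x hx]
    · rw [List.filter_cons]
      have : (tl.filter fun g_1 =>
          decide (0 < (if 0 < rem.getD g 0 then rem.set g (rem.getD g 0 - 1) else rem).getD g_1 0)) =
          tl.filter fun g_1 => decide (0 < rem.getD g_1 0) := by
        apply List.filter_congr
        intro x hx
        rw [hgd x hx]
      rw [this]
      by_cases h : 0 < rem[g]?.getD 0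
      · simp [h]
      · simp [h]

-- pointwise value of the set-fold
lemma getD_foldl_set (c : Nat → Prop) [DecidablePred c] (v : Nat → Int) (snap : List Nat) :
    ∀ (r0 : List Int) (j : Nat), snap.Nodup → (∀ g ∈ snap, g < r0.length) →
    (snap.foldl (fun r g => if c g then r.set g (v g) else r) r0).getD j 0 =
      if j ∈ snap ∧ c j then v j else r0.getD j 0 := by
  induction snap with
  | nil => intro r0 j _ _; simp
  | cons g tl ih =>
    intro r0 j hnd hlt
    simp only [List.nodup_cons] at hnd
    simp only [List.foldl_cons]
    rw [ih _ j hnd.2 (by intro g' hg'; simpa using (hlt g' (List.mem_cons_of_mem _ hg')).trans_le (by split <;> simp))]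
    by_cases hjt : j ∈ tl ∧ c j
    · simp [hjt]
    · rw [if_neg hjt]
      by_cases hcg : c g
      · by_cases hjg : j = g
        · subst hjg
          have hj : j < r0.length := hlt j (by simp)
          simp [hcg, List.getD_eq_getElem?_getD, hj]
        · simp only [hcg, if_true]
          rw [List.getD_eq_getElem?_getD, List.getElem?_set_ne (by omega), ← List.getD_eq_getElem?_getD]
          simp only [List.mem_cons]
          rw [if_neg (by rintro ⟨h1 | h1, h2⟩; exact hjg h1; exact hjt ⟨h1, h2⟩)]
      · simp only [List.mem_cons]
        have hne : ¬((j = g ∨ j ∈ tl) ∧ c j) := by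
          rintro ⟨h1 | h1, h2⟩
          · exact hcg (h1 ▸ h2)
          · exact hjt ⟨h1, h2⟩
        rw [if_neg hne, if_neg hcg]

lemma length_foldl_set (c : Nat → Prop) [DecidablePred c] (v : Nat → Int) (snap : List Nat) :
    ∀ (r0 : List Int),
    (snap.foldl (fun r g => if c g then r.set g (v g) else r) r0).length = r0.length := by
  induction snap with
  | nil => intro r0; rfl
  | cons g tl ih =>
    intro r0
    simp only [List.foldl_cons]
    rw [ih]
    split <;> simp

-- the erase-fold on a Nodup list is a filter
lemma foldl_erase_eq_filter (c : Nat → Prop) [DecidablePred c] (snap : List Nat) :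
    ∀ (act : List Nat), act.Nodup →
    snap.foldl (fun a g => if c g then a.erase g else a) act =
      act.filter (fun x => !(snap.contains x && decide (c x))) := by
  induction snap with
  | nil => intro act _; simp
  | cons g tl ih =>
    intro act hnd
    simp only [List.foldl_cons]
    by_cases hcg : c g
    · rw [if_pos hcg, ih _ (hnd.erase g), hnd.erase_eq_filter, List.filter_filter]
      apply List.filter_congr
      intro x _
      by_cases hxg : x = g <;> simp [hxg, hcg]
    · rw [if_neg hcg, ih _ hnd]
      apply List.filter_congr
      intro x _
      by_cases hxg : x = g <;> simp [hxg, hcg]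

-- one sweep starting from the level-t invariant state
lemma sweep_at_level (sizes : List Int) (t : Nat) (snap act : List Nat) (p : List Int)
    (hnd : snap.Nodup) (hlt : ∀ g ∈ snap, g < sizes.length)
    (hand : act.Nodup) (halt : ∀ g ∈ act, g < sizes.length)
    (hsub : ∀ x ∈ act, x ∈ snap)
    (hcov : ∀ g, g < sizes.length → (t : Int) < sizes.getD g 0 → g ∈ snap) :
    runSweep snap (mrem sizes t, act, p) =
      (mrem sizes (t + 1),
       act.filter (fun x => decide (((t : Int) + 1) < sizes.getD x 0)),
       p ++ (snap.filter (fun g => decide ((t : Int) < sizes.getD g 0))).map (fun g => (g : Int))) := by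
  rw [runSweep_eq snap (mrem sizes t) act p hnd
        (by intro g hg; rw [length_mrem]; exact hlt g hg)]
  refine congrArg₂ Prod.mk ?_ (congrArg₂ Prod.mk ?_ ?_)
  · -- remaining component
    apply List.ext_getElem
    · rw [length_foldl_set (fun g => 0 < (mrem sizes t).getD g 0) _ snap, length_mrem, length_mrem]
    · intro j hj1 hj2
      rw [← List.getD_eq_getElem _ 0 hj1, ← List.getD_eq_getElem _ 0 hj2]
      rw [getD_foldl_set (fun g => 0 < (mrem sizes t).getD g 0) _ snap _ j hnd
            (by intro g hg; rw [length_mrem]; exact hlt g hg)]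
      have hjk : j < sizes.length := by
        rw [length_foldl_set, length_mrem] at hj1; exact hj1
      rw [getD_mrem _ _ _ hjk]
      by_cases hS : (t : Int) < sizes.getD j 0
      · rw [if_pos ⟨hcov j hjk hS, by omega⟩, getD_mrem _ _ _ hjk]
        push_cast
        omega
      · rw [if_neg (by rintro ⟨_, hc⟩; omega), getD_mrem _ _ _ hjk]
        push_cast
        omega
  · -- active component
    rw [foldl_erase_eq_filter
          (fun g => (if 0 < (mrem sizes t).getD g 0 then (mrem sizes t).getD g 0 - 1
                     else (mrem sizes t).getD g 0) = 0) snap act hand]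
    apply List.filter_congr
    intro x hx
    have hxk : x < sizes.length := halt x hx
    have hxs : snap.contains x := by simpa using hsub x hx
    rw [hxs, getD_mrem _ _ _ hxk]
    simp only [Bool.true_and]
    have hiff : ((if 0 < max (sizes.getD x 0 - (t:Int)) 0 then max (sizes.getD x 0 - (t:Int)) 0 - 1
                  else max (sizes.getD x 0 - (t:Int)) 0) = 0) ↔ ¬ (((t:Int) + 1) < sizes.getD x 0) := by
      split <;> omega
    rw [decide_eq_decide.mpr hiff, decide_not, Bool.not_not]
  · -- pattern component
    have hf : (snap.filter fun g => decide (0 < (mrem sizes t).getD g 0)) =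
        snap.filter (fun g => decide ((t : Int) < sizes.getD g 0)) := by
      apply List.filter_congr
      intro g hg
      rw [getD_mrem _ _ _ (hlt g hg)]
      have hiff : (0 < max (sizes.getD g 0 - (t:Int)) 0) ↔ ((t:Int) < sizes.getD g 0) := by omega
      simp [hiff]
    rw [hf]

-- levels only shrink: once empty, always empty
lemma levelOf_empty_mono (sizes : List Int) {t t' : Nat} (h : t ≤ t')
    (he : levelOf sizes t = []) : levelOf sizes t' = [] := by
  rw [levelOf, List.filter_eq_nil_iff] at he ⊢
  intro g hg
  have := he g hg
  simp only [decide_eq_true_eq] at this ⊢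
  have : ((t:Int)) ≤ (t':Int) := by exact_mod_cast h
  omega

lemma levelOf_filter_succ (sizes : List Int) (t : Nat) :
    (levelOf sizes t).filter (fun x => decide (((t:Int) + 1) < sizes.getD x 0)) =
      levelOf sizes (t + 1) := by
  simp only [levelOf, List.filter_filter]
  apply List.filter_congr
  intro g _
  by_cases h1 : ((t:Int) + 1) < sizes.getD g 0
  · have h2 : ((t:Int)) < sizes.getD g 0 := by omega
    have h3 : (((t+1:Nat)):Int) < sizes.getD g 0 := by push_cast; omega
    simp only [List.getD_eq_getElem?_getD] at h1 h2 h3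
    simp [h1, h2, h3]
  · have h3 : ¬ ((((t+1:Nat)):Int) < sizes.getD g 0) := by push_cast; omega
    simp only [List.getD_eq_getElem?_getD] at h1 h3
    simp [h1, h3]

lemma levelOf_self_filter (sizes : List Int) (t : Nat) :
    (levelOf sizes t).filter (fun g => decide ((t:Int) < sizes.getD g 0)) = levelOf sizes t := by
  rw [List.filter_eq_self]
  intro g hg
  rw [mem_levelOf] at hg
  simpa using hg.2

-- the while loop from the invariant state at an even level 2*i
lemma whileLoop_inv (sizes : List Int) :
    ∀ (fuel i : Nat) (p : List Int),
    whileLoop fuel (mrem sizes (2 * i)) (levelOf sizes (2 * i)) p =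
      p ++ ((List.range' (2 * i) (2 * fuel)).map (dirLevel sizes)).flatten := by
  intro fuel
  induction fuel with
  | zero => intro i p; simp [whileLoop]
  | succ fuel ih =>
    intro i p
    by_cases hemp : levelOf sizes (2 * i) = []
    · rw [whileLoop, if_pos (by simp [hemp])]
      have hall : ∀ l ∈ (List.range' (2*i) (2*(fuel+1))).map (dirLevel sizes), l = [] := by
        intro l hl
        rw [List.mem_map] at hl
        obtain ⟨t, ht, rfl⟩ := hl
        have ht2 : 2*i ≤ t := (List.mem_range'_1.mp ht).1
        rw [dirLevel, levelOf_empty_mono sizes ht2 hemp]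
        split <;> simp
      rw [List.flatten_eq_nil_iff.mpr hall, List.append_nil]
    · rw [whileLoop, if_neg (by simp [hemp])]
      have hnd := nodup_levelOf sizes (2*i)
      have hlt : ∀ g ∈ levelOf sizes (2*i), g < sizes.length := fun g hg => ((mem_levelOf _ _ _).mp hg).1
      have h1 := sweep_at_level sizes (2*i) (levelOf sizes (2*i)) (levelOf sizes (2*i)) p
        hnd hlt hnd hlt (fun x hx => hx)
        (fun g hgk hgS => (mem_levelOf _ _ _).mpr ⟨hgk, hgS⟩)
      have hnd' := nodup_levelOf sizes (2*i+1)
      have hlt' : ∀ g ∈ levelOf sizes (2*i+1), g < sizes.length := fun g hg => ((mem_levelOf _ _ _).mp hg).1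
      have h2 := sweep_at_level sizes (2*i+1) ((levelOf sizes (2*i+1)).reverse) (levelOf sizes (2*i+1))
        (p ++ ((levelOf sizes (2*i)).filter (fun g => decide (((2*i:Nat):Int) < sizes.getD g 0))).map (fun g => (g : Int)))
        (List.nodup_reverse.mpr hnd') (fun g hg => hlt' g (List.mem_reverse.mp hg)) hnd' hlt'
        (fun x hx => List.mem_reverse.mpr hx)
        (fun g hgk hgS => List.mem_reverse.mpr ((mem_levelOf _ _ _).mpr ⟨hgk, hgS⟩))
      rw [levelOf_filter_succ] at h1
      rw [levelOf_filter_succ] at h2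
      have e0 : ((levelOf sizes (2*i)).filter
            (fun g => decide ((((2*i : Nat)):Int) < sizes.getD g 0))).map (fun g => (g : Int)) =
          dirLevel sizes (2*i) := by
        rw [levelOf_self_filter, dirLevel, if_neg (by omega)]
      have eb : (((levelOf sizes (2*i+1)).reverse).filter
            (fun g => decide ((((2*i+1 : Nat)):Int) < sizes.getD g 0))).map (fun g => (g : Int)) =
          dirLevel sizes (2*i+1) := by
        rw [List.filter_reverse, levelOf_self_filter, dirLevel, if_pos (by omega)]
      simp only [h1]
      rw [h2]
      rw [show 2*i+1+1 = 2*(i+1) from by omega]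
      rw [ih (i+1)]
      rw [show 2*(fuel+1) = 2*fuel+1+1 from by omega, List.range'_succ, List.range'_succ,
          List.map_cons, List.map_cons, List.flatten_cons, List.flatten_cons,
          show 2*i+1+1 = 2*(i+1) from by omega, e0, eb]
      simp [List.append_assoc]

-- on non-negative sizes nothing has been dealt at level 0
lemma mrem_zero (sizes : List Int) (hpre : ∀ s ∈ sizes, 0 ≤ s) : mrem sizes 0 = sizes := by
  rw [mrem]
  conv_rhs => rw [← List.map_id sizes]
  apply List.map_congr_left
  intro s hs
  have := hpre s hs
  simp
  omega

lemma foldl_toNat_init_le (l : List Int) : ∀ (a : Nat), a ≤ l.foldl (fun a s => a + s.toNat) a := by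
  induction l with
  | nil => intro a; simp
  | cons b tl ih =>
    intro a
    simp only [List.foldl_cons]
    exact (Nat.le_add_right a b.toNat).trans (ih (a + b.toNat))

-- every size is at most the fuel the port passes to the loop
lemma toNat_le_fuel (sizes : List Int) : ∀ s ∈ sizes, s.toNat ≤ sizes.foldl (fun a s => a + s.toNat) 0 := by
  suffices h : ∀ (a : Nat), ∀ s ∈ sizes, s.toNat ≤ sizes.foldl (fun a s => a + s.toNat) a from h 0
  induction sizes with
  | nil => intro a s hs; simp at hs
  | cons b tl ih =>
    intro a s hs
    simp only [List.foldl_cons]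
    rcases List.mem_cons.mp hs with rfl | hs
    · exact (Nat.le_add_left s.toNat a).trans (foldl_toNat_init_le tl _)
    · exact ih _ s hs

-- beyond the maximum, levels are empty
lemma levelOf_ge_max_empty (sizes : List Int) (t : Nat)
    (ht : (sizes.max?.getD 0).toNat ≤ t) : levelOf sizes t = [] := by
  rw [levelOf, List.filter_eq_nil_iff]
  intro g hg
  rw [List.mem_range] at hg
  simp only [decide_eq_true_eq]
  have hmem : sizes.getD g 0 ∈ sizes := by
    rw [List.getD_eq_getElem?_getD, List.getElem?_eq_getElem hg]
    exact List.getElem_mem hg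
  cases hm : sizes.max? with
  | none =>
    rw [List.max?_eq_none_iff] at hm
    subst hm; simp at hmem
  | some m =>
    have hle : sizes.getD g 0 ≤ m := (List.max?_eq_some_iff.mp hm).2 _ hmem
    rw [hm] at ht
    simp only [Option.getD_some] at ht
    have : (m.toNat : Int) ≤ (t : Int) := by exact_mod_cast ht
    omega

lemma flatten_map_range_ext (f : Nat → List Int) (M N : Nat) (hMN : M ≤ N)
    (hf : ∀ t, M ≤ t → f t = []) :
    ((List.range N).map f).flatten = ((List.range M).map f).flatten := by
  rw [show N = M + (N - M) from by omega, List.range_add, List.map_append, List.flatten_append]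
  have : ((List.map (fun x => M + x) (List.range (N - M))).map f).flatten = [] := by
    rw [List.flatten_eq_nil_iff]
    intro l hl
    rw [List.map_map, List.mem_map] at hl
    obtain ⟨x, _, rfl⟩ := hl
    exact hf _ (Nat.le_add_right M x)
  rw [this, List.append_nil]

-- B in flatten-of-levels normal form
lemma alt_eq_flatten (sizes : List Int) :
    serpentine_pattern_py_alt sizes =
      ((List.range (sizes.max?.getD 0).toNat).map (dirLevel sizes)).flatten := by
  show (List.range (sizes.max?.getD 0).toNat).foldl
      (fun pat t => pat ++ (if t % 2 = 1 then (levelOf sizes t).reverse else levelOf sizes t).map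
        (fun g => (g : Int))) [] = _
  rw [PySem.List.foldl_append_eq_flatMap]
  rw [List.nil_append, List.flatMap_def]
  rfl

-- the first while iteration, from the initial state (active = range k)
lemma whileLoop_first (sizes : List Int) (hpre : ∀ s ∈ sizes, 0 ≤ s) (fuel : Nat)
    (hne : sizes.length ≠ 0) :
    whileLoop (fuel + 1) sizes (List.range sizes.length) [] =
      ((List.range' 0 (2 * (fuel + 1))).map (dirLevel sizes)).flatten := by
  rw [whileLoop, if_neg (by simp [List.isEmpty_iff, hne, ← List.length_eq_zero_iff])]
  have h1 := sweep_at_level sizes 0 (List.range sizes.length) (List.range sizes.length) []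
    List.nodup_range (fun g hg => List.mem_range.mp hg)
    List.nodup_range (fun g hg => List.mem_range.mp hg)
    (fun x hx => hx) (fun g hgk _ => List.mem_range.mpr hgk)
  rw [mrem_zero sizes hpre] at h1
  have hact1 : (List.range sizes.length).filter
      (fun x => decide ((((0:Nat)):Int) + 1 < sizes.getD x 0)) = levelOf sizes 1 := by
    apply List.filter_congr
    intro g _
    norm_num
  have hpat1 : (List.range sizes.length).filter
      (fun g => decide ((((0:Nat)):Int) < sizes.getD g 0)) = levelOf sizes 0 := rfl
  rw [hact1, hpat1] at h1
  rw [show (0:Nat)+1 = 1 from rfl] at h1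
  simp only [h1]
  have hnd' := nodup_levelOf sizes 1
  have hlt' : ∀ g ∈ levelOf sizes 1, g < sizes.length := fun g hg => ((mem_levelOf _ _ _).mp hg).1
  have h2 := sweep_at_level sizes 1 ((levelOf sizes 1).reverse) (levelOf sizes 1)
    ([] ++ (levelOf sizes 0).map (fun g => (g : Int)))
    (List.nodup_reverse.mpr hnd') (fun g hg => hlt' g (List.mem_reverse.mp hg)) hnd' hlt'
    (fun x hx => List.mem_reverse.mpr hx)
    (fun g hgk hgS => List.mem_reverse.mpr ((mem_levelOf _ _ _).mpr ⟨hgk, hgS⟩))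
  rw [levelOf_filter_succ] at h2
  rw [show (1:Nat)+1 = 2*1 from rfl] at h2
  simp only [h2]
  rw [whileLoop_inv sizes fuel 1]
  have e0 : (levelOf sizes 0).map (fun g => (g : Int)) = dirLevel sizes 0 := by
    rw [dirLevel, if_neg (by omega)]
  have eb : (((levelOf sizes 1).reverse).filter
        (fun g => decide ((((1 : Nat)):Int) < sizes.getD g 0))).map (fun g => (g : Int)) =
      dirLevel sizes 1 := by
    rw [List.filter_reverse, levelOf_self_filter, dirLevel, if_pos (by omega)]
  rw [eb]
  rw [show 2*(fuel+1) = 2*fuel+1+1 from by omega, List.range'_succ, List.range'_succ,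
      List.map_cons, List.map_cons, List.flatten_cons, List.flatten_cons,
      show (0:Nat)+1 = 1 from rfl, show (1:Nat)+1 = 2*1 from rfl, ← e0]
  simp [List.append_assoc]

theorem serpentine_pattern_py_spec : Claim_equal_serpentine_pattern_py := by
  intro sizes _ hpre
  show serpentine_pattern_py sizes = serpentine_pattern_py_alt sizes
  by_cases hnil : sizes = []
  · subst hnil; rfl
  · have hne : sizes.length ≠ 0 := by simpa [List.length_eq_zero_iff] using hnil
    rw [serpentine_pattern_py, alt_eq_flatten, whileLoop_first sizes hpre _ hne]
    rw [show List.range' 0 (2 * (sizes.foldl (fun a s => a + s.toNat) 0 + 1)) =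
          List.range (2 * (sizes.foldl (fun a s => a + s.toNat) 0 + 1)) from List.range_eq_range'.symm]
    apply flatten_map_range_ext
    · -- M ≤ 2*(F+1)
      cases hm : sizes.max? with
      | none => simp [List.max?_eq_none_iff] at hm; exact absurd hm hnil
      | some m =>
        have hmem : m ∈ sizes := (List.max?_eq_some_iff.mp hm).1
        have := toNat_le_fuel sizes m hmem
        simp only [hm, Option.getD_some]
        omega
    · intro t ht
      rw [dirLevel, levelOf_ge_max_empty sizes t ht]
      split <;> simp
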